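-- pv_equiv track=rewrite | github.com/hgkim1598/Python_Algorithm | 프로그래머스/lv1/12930. 이상한 문자 만들기/이상한 문자 만들기.py | solution
-- ===== SOURCE A (Python) =====
-- def solution(s):
--     answer = ''
--     words = s.split(' ')
--     for i in words:
--         for j in range(len(i)):
--             if j % 2 == 0:
--                 answer += i[j].upper()
--             else:
--                 answer += i[j].lower()
--         answer += " "
--     return answer[0:-1]
-- ===== SOURCE B (Python) =====
-- def solution(s):
--     out = []
--     k = 0
--     for ch in s:
--         if ch == ' ':
--             out.append(' ')
--             k = 0
--         else:
--             out.append(ch.upper() if k % 2 == 0 else ch.lower())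
--             k += 1
--     return ''.join(out)
-- ===== Notes on version B (the rewrite author's own statement) =====
-- stated objective: simpler
-- what changed: Single character-by-character pass with a per-word position counter that resets at each space, instead of splitting on spaces plus a nested index loop plus string concatenation with trailing-space trimming.
import Mathlib
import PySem

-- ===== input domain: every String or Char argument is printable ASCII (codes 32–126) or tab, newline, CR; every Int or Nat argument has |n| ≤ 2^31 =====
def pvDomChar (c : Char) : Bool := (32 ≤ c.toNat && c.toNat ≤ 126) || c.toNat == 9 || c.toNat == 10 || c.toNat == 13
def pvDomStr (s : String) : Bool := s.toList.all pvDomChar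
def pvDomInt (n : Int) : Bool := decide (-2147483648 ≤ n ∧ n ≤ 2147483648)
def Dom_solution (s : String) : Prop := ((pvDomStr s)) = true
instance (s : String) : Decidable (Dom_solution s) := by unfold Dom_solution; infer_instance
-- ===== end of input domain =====

-- B replaces split(' ')+nested index loop+trailing-space trimming by one pass with a per-word counter; objective: simpler. Same return value on all inputs.

-- ===== PORT A =====
def solution (s : String) : String :=
  let answer : List Char := []
  let words := PySem.Chars.splitOn s.toList [' ']
  let answer := words.foldl (fun answer i =>
    let answer := (PySem.List.pyRange 0 (i.length : Int) 1).foldl (fun answer j =>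
      if PySem.Int.mod j 2 == 0 then
        answer ++ [PySem.Chars.upperChar (PySem.List.pyGetD i j ' ')]
      else
        answer ++ [PySem.Chars.lowerChar (PySem.List.pyGetD i j ' ')]) answer
    answer ++ [' ']) answer
  String.mk (PySem.List.slice answer (some 0) (some (-1)))

-- ===== PORT B =====
def solution_alt (s : String) : String :=
  let r := s.toList.foldl (fun (p : List Char × Nat) ch =>
    if ch = ' ' then (p.1 ++ [' '], 0)
    else (p.1 ++ [if p.2 % 2 = 0 then PySem.Chars.upperChar ch else PySem.Chars.lowerChar ch], p.2 + 1))
    ([], 0)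
  String.mk r.1

-- ===== PRECONDITION & SPEC =====
def Spec_solution (s : String) (out : String) : Prop := out = solution_alt s
instance (s : String) (out : String) : Decidable (Spec_solution s out) := by unfold Spec_solution; infer_instance

-- ===== CLAIM (what is proved, stated in full; the proofs are below) =====
def Claim_equal_solution : Prop := ∀ (s : String), Dom_solution s → Spec_solution s (solution s)

-- ===== LEMMAS AND PROOFS =====

-- alternate-case of a word, position counter starting at k
def caseChar (k : Nat) (c : Char) : Char :=
  if k % 2 = 0 then PySem.Chars.upperChar c else PySem.Chars.lowerChar c

def caseFrom : Nat → List Char → List Char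
  | _, [] => []
  | k, c :: cs => caseChar k c :: caseFrom (k + 1) cs

-- structural version of s.split(' ')
def splitSp : List Char → List (List Char)
  | [] => [[]]
  | c :: cs =>
    if c = ' ' then [] :: splitSp cs
    else
      match splitSp cs with
      | [] => [[c]]
      | w :: ws => (c :: w) :: ws

def consHead (p : List Char) : List (List Char) → List (List Char)
  | [] => [p]
  | w :: ws => (p ++ w) :: ws

-- B's pass, as a structural recursion
def runB : Nat → List Char → List Char
  | _, [] => []
  | k, c :: cs => if c = ' ' then ' ' :: runB 0 cs else caseChar k c :: runB (k + 1) cs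

-- the common value: cased words joined by single spaces, first word cased from k
def J : Nat → List (List Char) → List Char
  | _, [] => []
  | k, w :: ws => caseFrom k w ++ ws.flatMap (fun w => ' ' :: caseFrom 0 w)

theorem splitSp_ne_nil (cs : List Char) : splitSp cs ≠ [] := by
  cases cs with
  | nil => simp [splitSp]
  | cons c cs =>
    simp only [splitSp]
    split
    · simp
    · split <;> simp_all

theorem go_spec (fuel : Nat) : ∀ (l cur : List Char) (acc : List (List Char)),
    l.length < fuel →
    PySem.Chars.splitOn.go [' '] fuel l cur acc = acc.reverse ++ consHead cur.reverse (splitSp l) := by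
  induction fuel with
  | zero => intro l cur acc h; omega
  | succ fuel ih =>
    intro l cur acc h
    cases l with
    | nil => simp [PySem.Chars.splitOn.go, splitSp, consHead]
    | cons c rest =>
      by_cases hc : c = ' '
      · subst hc
        have hpre : [' '].isPrefixOf (' ' :: rest) = true := by simp [List.isPrefixOf]
        rw [PySem.Chars.splitOn.go]
        simp only [hpre, if_pos, List.length_singleton, List.drop_one, List.tail_cons]
        rw [ih rest [] (cur.reverse :: acc) (by simpa using Nat.lt_of_succ_lt_succ h)]
        simp only [splitSp, if_pos rfl]
        obtain ⟨w, ws, hws⟩ : ∃ w ws, splitSp rest = w :: ws := by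
          cases hsp : splitSp rest with
          | nil => exact absurd hsp (splitSp_ne_nil rest)
          | cons w ws => exact ⟨w, ws, rfl⟩
        simp [hws, consHead]
      · have hpre : [' '].isPrefixOf (c :: rest) = false := by
          simp [List.isPrefixOf]; exact fun h' => hc h'.symm
        rw [PySem.Chars.splitOn.go]
        simp only [hpre, Bool.false_eq_true, if_false]
        rw [ih rest (c :: cur) acc (by simpa using Nat.lt_of_succ_lt_succ h)]
        simp only [splitSp, if_neg hc]
        obtain ⟨w, ws, hws⟩ : ∃ w ws, splitSp rest = w :: ws := by
          cases hsp : splitSp rest with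
          | nil => exact absurd hsp (splitSp_ne_nil rest)
          | cons w ws => exact ⟨w, ws, rfl⟩
        simp [hws, consHead]

theorem splitOn_space (l : List Char) : PySem.Chars.splitOn l [' '] = splitSp l := by
  rw [PySem.Chars.splitOn, go_spec (l.length + 1) l [] [] (by omega)]
  cases hsp : splitSp l with
  | nil => exact absurd hsp (splitSp_ne_nil l)
  | cons w ws => simp [consHead]

theorem mod_two_cast (n : Nat) : PySem.Int.mod (n : Int) 2 = ((n % 2 : Nat) : Int) := by
  rw [PySem.Int.mod_eq_emod_of_pos (by norm_num)]; omega

-- A's inner loop from index n produces caseFrom n of the suffix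
theorem innerA (w : List Char) : ∀ (n : Nat) (acc : List Char), n ≤ w.length →
    (PySem.List.pyRange (n : Int) (w.length : Int) 1).foldl (fun answer j =>
      if PySem.Int.mod j 2 == 0 then
        answer ++ [PySem.Chars.upperChar (PySem.List.pyGetD w j ' ')]
      else
        answer ++ [PySem.Chars.lowerChar (PySem.List.pyGetD w j ' ')]) acc
    = acc ++ caseFrom n (w.drop n) := by
  intro n
  induction hm : w.length - n generalizing n with
  | zero =>
    intro acc hn
    have hn' : n = w.length := by omega
    subst hn'
    rw [PySem.List.pyRange_one_eq_nil (le_refl _)]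
    simp [caseFrom]
  | succ m ih =>
    intro acc hn
    have hlt : n < w.length := by omega
    rw [PySem.List.pyRange_one_cons (by exact_mod_cast hlt)]
    simp only [List.foldl_cons]
    have hget : PySem.List.pyGetD w (n : Int) ' ' = w[n] := by
      rw [PySem.List.pyGetD_natCast]
      simp [List.getD, List.getElem?_eq_getElem hlt]
    have hdrop : w.drop n = w[n] :: w.drop (n + 1) := List.drop_eq_getElem_cons hlt
    have : ((n : Int) + 1) = ((n + 1 : Nat) : Int) := by omega
    rw [this, ih (n + 1) (by omega) _ (by omega)]
    rw [hdrop]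
    simp only [caseFrom, caseChar, hget, mod_two_cast]
    have h2 : (2 ∣ (n : Int)) ↔ n % 2 = 0 := by omega
    by_cases hpar : n % 2 = 0 <;> simp [hpar, h2]

-- A's outer loop appends the cased words each followed by a space
theorem outerA (ws : List (List Char)) : ∀ (acc : List Char),
    ws.foldl (fun answer i =>
      let answer := (PySem.List.pyRange 0 (i.length : Int) 1).foldl (fun answer j =>
        if PySem.Int.mod j 2 == 0 then
          answer ++ [PySem.Chars.upperChar (PySem.List.pyGetD i j ' ')]
        else
          answer ++ [PySem.Chars.lowerChar (PySem.List.pyGetD i j ' ')]) answer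
      answer ++ [' ']) acc
    = acc ++ ws.flatMap (fun w => caseFrom 0 w ++ [' ']) := by
  induction ws with
  | nil => intro acc; simp
  | cons w ws ih =>
    intro acc
    simp only [List.foldl_cons, List.flatMap_cons]
    have hinner := innerA w 0 acc (Nat.zero_le _)
    simp only [Nat.cast_zero, List.drop_zero] at hinner
    rw [hinner, ih]
    simp

theorem dropLast_flatMap (ws : List (List Char)) : ∀ (w : List Char),
    (((w :: ws).flatMap (fun w => caseFrom 0 w ++ [' '])).dropLast) = J 0 (w :: ws) := by
  induction ws with
  | nil => intro w; simp [J]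
  | cons w' ws ih =>
    intro w
    have hne : ((w' :: ws).flatMap (fun w => caseFrom 0 w ++ [' '])) ≠ [] := by
      simp [List.flatMap_cons]
    calc ((w :: w' :: ws).flatMap (fun w => caseFrom 0 w ++ [' '])).dropLast
        = (caseFrom 0 w ++ [' '] ++ (w' :: ws).flatMap (fun w => caseFrom 0 w ++ [' '])).dropLast := by
          simp [List.flatMap_cons]
      _ = caseFrom 0 w ++ [' '] ++ ((w' :: ws).flatMap (fun w => caseFrom 0 w ++ [' '])).dropLast := by
          rw [List.dropLast_append_of_ne_nil hne]
      _ = caseFrom 0 w ++ [' '] ++ J 0 (w' :: ws) := by rw [ih]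
      _ = J 0 (w :: w' :: ws) := by simp [J, List.flatMap_cons]

theorem slice_zero_neg_one (xs : List Char) :
    PySem.List.slice xs (some 0) (some (-1)) = xs.dropLast := by
  rw [← PySem.List.slice_to_neg_one (xs := xs)]
  simp [PySem.List.slice]

-- B's fold equals runB
theorem foldB (cs : List Char) : ∀ (acc : List Char) (k : Nat),
    (cs.foldl (fun (p : List Char × Nat) ch =>
      if ch = ' ' then (p.1 ++ [' '], 0)
      else (p.1 ++ [if p.2 % 2 = 0 then PySem.Chars.upperChar ch else PySem.Chars.lowerChar ch], p.2 + 1))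
      (acc, k)).1 = acc ++ runB k cs := by
  induction cs with
  | nil => intro acc k; simp [runB]
  | cons c cs ih =>
    intro acc k
    simp only [List.foldl_cons, runB]
    by_cases hc : c = ' '
    · simp [hc, ih]
    · simp only [hc, if_false, ih, caseChar]
      by_cases hpar : k % 2 = 0 <;> simp [hpar]

theorem runB_eq_J (cs : List Char) : ∀ (k : Nat), runB k cs = J k (splitSp cs) := by
  induction cs with
  | nil => intro k; simp [runB, splitSp, J, caseFrom]
  | cons c cs ih =>
    intro k
    obtain ⟨w, ws, hws⟩ : ∃ w ws, splitSp cs = w :: ws := by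
      cases hsp : splitSp cs with
      | nil => exact absurd hsp (splitSp_ne_nil cs)
      | cons w ws => exact ⟨w, ws, rfl⟩
    by_cases hc : c = ' '
    · subst hc
      simp [runB, splitSp, ih, hws, J, caseFrom]
    · simp [runB, splitSp, hc, ih, hws, J, caseFrom]

-- ===== VERDICT (by name: the statement is the Claim_ definition above) =====
theorem solution_spec : Claim_equal_solution := by
  intro s _
  unfold Spec_solution solution solution_alt
  simp only []
  rw [splitOn_space, foldB, outerA]
  obtain ⟨w, ws, hws⟩ : ∃ w ws, splitSp s.toList = w :: ws := by
    cases hsp : splitSp s.toList with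
    | nil => exact absurd hsp (splitSp_ne_nil s.toList)
    | cons w ws => exact ⟨w, ws, rfl⟩
  rw [hws, List.nil_append, List.nil_append, slice_zero_neg_one, dropLast_flatMap, runB_eq_J, hws]
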